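-- pv_equiv track=rewrite | github.com/lucadesabato/COVRIN_taskT2.1-_scripts | COVRIN_Results_script.py | find_insertions
-- ===== SOURCE A (Python) =====
-- def find_insertions(reference, seq):
-- 	k=0
-- 	ins_long={}
-- 	lun=0
-- 	while k<len(reference):
-- 		if reference[k] == "-" and seq[k]!="-" and seq[k] not in ["n", "N"] and reference[k]!=seq[k]:
-- 			lun+=1
-- 			k+=1
-- 		else:
-- 			if lun>0:
-- 				ins_long[k-lun+1]=lun
-- 				k+=1
-- 				lun=0
-- 			else:
-- 				lun=0
-- 				k+=1
-- 	if lun>0: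
-- 			ins_long[k-lun+1]=lun
-- 	return ins_long
-- ===== SOURCE B (Python) =====
-- def find_insertions(reference, seq):
-- 	# collect the gap-insertion positions, then group maximal runs of consecutive indices
-- 	idxs = [k for k in range(len(reference))
-- 	        if reference[k] == "-" and seq[k] not in ("-", "n", "N")]
-- 	ins_long = {}
-- 	cur = None  # (start, prev) of the run being grown
-- 	for k in idxs:
-- 		if cur is not None and k == cur[1] + 1:
-- 			cur = (cur[0], k)
-- 		else:
-- 			if cur is not None:
-- 				ins_long[cur[0] + 1] = cur[1] - cur[0] + 1
-- 			cur = (k, k)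
-- 	if cur is not None:
-- 		ins_long[cur[0] + 1] = cur[1] - cur[0] + 1
-- 	return ins_long
-- ===== Notes on version B (the rewrite author's own statement) =====
-- stated objective: alternative
-- what changed: Replaces A's single stateful while-loop (run counter flushed in the else-branch) by collect-then-group: one comprehension gathers the insertion indices, then a separate pass groups maximal runs of consecutive indices and emits start+1 -> length.
import Mathlib
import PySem

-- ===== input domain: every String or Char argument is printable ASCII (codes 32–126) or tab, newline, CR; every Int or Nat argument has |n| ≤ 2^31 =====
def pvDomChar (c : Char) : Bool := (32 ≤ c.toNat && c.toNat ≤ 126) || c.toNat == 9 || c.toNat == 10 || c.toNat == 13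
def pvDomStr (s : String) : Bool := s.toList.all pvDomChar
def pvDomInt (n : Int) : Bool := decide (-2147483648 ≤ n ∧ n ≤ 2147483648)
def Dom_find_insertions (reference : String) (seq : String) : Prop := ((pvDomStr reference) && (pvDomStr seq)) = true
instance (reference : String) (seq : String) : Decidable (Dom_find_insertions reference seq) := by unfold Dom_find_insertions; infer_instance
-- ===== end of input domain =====

-- B replaces A's single stateful while-loop by collect-the-indices then group-consecutive-runs
-- (same O(n) cost, different decomposition).

-- ===== PORT A =====
-- the while-loop: state k, ins_long (dict), lun
def findInsLoopA (r s : List Char) (k : Int) (d : PySem.Dict Int Int) (lun : Int) :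
    PySem.Dict Int Int :=
  if _h : k < (r.length : Int) then
    if PySem.List.pyGet? r k = some '-' then
      match PySem.List.pyGet? s k with
      | none => d  -- Python raises IndexError here; excluded by Pre_find_insertions
      | some sc =>
        if sc ≠ '-' ∧ ¬ (sc = 'n' ∨ sc = 'N') ∧ PySem.List.pyGet? r k ≠ some sc then
          findInsLoopA r s (k + 1) d (lun + 1)
        else
          if lun > 0 then findInsLoopA r s (k + 1) (d.insert (k - lun + 1) lun) 0
          else findInsLoopA r s (k + 1) d 0
    else
      if lun > 0 then findInsLoopA r s (k + 1) (d.insert (k - lun + 1) lun) 0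
      else findInsLoopA r s (k + 1) d 0
  else
    if lun > 0 then d.insert (k - lun + 1) lun else d
termination_by ((r.length : Int) - k).toNat
decreasing_by all_goals omega

def find_insertions (reference : String) (seq : String) : List (Int × Int) :=
  (findInsLoopA reference.toList seq.toList 0 PySem.Dict.empty 0).items

-- ===== PORT B =====
-- the comprehension's filter condition
def findInsGood (r s : List Char) (k : Int) : Bool :=
  (PySem.List.pyGet? r k == some '-') &&
    (match PySem.List.pyGet? s k with
     | some c => !(c == '-' || c == 'n' || c == 'N')
     | none => false)  -- Python raises IndexError here; excluded by Pre_find_insertions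

-- one step of the grouping loop; state = (ins_long, cur)
def findInsStep (st : PySem.Dict Int Int × Option (Int × Int)) (k : Int) :
    PySem.Dict Int Int × Option (Int × Int) :=
  match st.2 with
  | some (a, b) =>
      if k = b + 1 then (st.1, some (a, k))
      else ((st.1.insert (a + 1) (b - a + 1)), some (k, k))
  | none => (st.1, some (k, k))

-- the final 'if cur is not None' flush
def findInsFlush (st : PySem.Dict Int Int × Option (Int × Int)) : PySem.Dict Int Int :=
  match st.2 with
  | some (a, b) => st.1.insert (a + 1) (b - a + 1)
  | none => st.1

def find_insertions_alt (reference : String) (seq : String) : List (Int × Int) :=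
  let r := reference.toList
  let s := seq.toList
  let idxs := (PySem.List.pyRange 0 (r.length : Int) 1).filter (findInsGood r s)
  (findInsFlush (idxs.foldl findInsStep (PySem.Dict.empty, none))).items

-- ===== PRECONDITION & SPEC =====
-- Pre_ excludes exactly the inputs where A raises IndexError: a '-' in reference at a
-- position past the end of seq.
def Pre_find_insertions (reference : String) (seq : String) : Prop :=
  ∀ k : Nat, k < reference.toList.length → reference.toList.getD k ' ' = '-' →
    k < seq.toList.length
instance (reference : String) (seq : String) : Decidable (Pre_find_insertions reference seq) := by
  unfold Pre_find_insertions; infer_instance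

def pvWitness_find_insertions : String × String := ("a--b", "aCGb")

def Spec_find_insertions (reference : String) (seq : String) (out : List (Int × Int)) : Prop := out = find_insertions_alt reference seq
instance (reference : String) (seq : String) (out : List (Int × Int)) : Decidable (Spec_find_insertions reference seq out) := by unfold Spec_find_insertions; infer_instance

-- ===== CLAIM (what is proved, stated in full; the proofs are below) =====
def Claim_equal_find_insertions : Prop := ∀ (reference : String) (seq : String), Dom_find_insertions reference seq → Pre_find_insertions reference seq → Spec_find_insertions reference seq (find_insertions reference seq)

-- ===== LEMMAS AND PROOFS =====

-- current-run descriptor of B matching A's counter lun at position k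
def findInsCur (k lun : Int) : Option (Int × Int) :=
  if lun = 0 then none else some (k - lun, k - 1)

-- a pending run whose next index cannot extend it may be flushed immediately
lemma flush_foldl_break (L : List Int) (d : PySem.Dict Int Int) (a b : Int)
    (h : ∀ x ∈ L, x ≠ b + 1) :
    findInsFlush (L.foldl findInsStep (d, some (a, b))) =
    findInsFlush (L.foldl findInsStep (d.insert (a + 1) (b - a + 1), none)) := by
  cases L with
  | nil => rfl
  | cons x L' =>
      have hx : x ≠ b + 1 := h x (List.mem_cons_self)
      simp [List.foldl_cons, findInsStep, hx]

-- the main loop correspondence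
lemma loopA_eq_foldB (r s : List Char)
    (hpre : ∀ k : Nat, k < r.length → r.getD k ' ' = '-' → k < s.length) :
    ∀ m (k lun : Int) (d : PySem.Dict Int Int), 0 ≤ lun → lun ≤ k →
      m = ((r.length : Int) - k).toNat →
      findInsLoopA r s k d lun =
      findInsFlush (((PySem.List.pyRange k (r.length : Int) 1).filter
          (findInsGood r s)).foldl findInsStep (d, findInsCur k lun)) := by
  intro m
  induction m with
  | zero =>
      intro k lun d hlun hlk hm
      have hk : (r.length : Int) ≤ k := by omega
      rw [PySem.List.pyRange_one_eq_nil hk]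
      rw [findInsLoopA]
      simp only [List.filter_nil, List.foldl_nil]
      have hnk : ¬ k < (r.length : Int) := by omega
      rw [dif_neg hnk]
      by_cases h0 : lun = 0
      · simp [h0, findInsCur, findInsFlush]
      · have hl : lun > 0 := by omega
        simp only [if_pos hl, findInsCur, if_neg h0, findInsFlush]
        congr 1 <;> omega
  | succ m ih =>
      intro k lun d hlun hlk hm
      have hk : k < (r.length : Int) := by omega
      have hk0 : 0 ≤ k := by omega
      rw [PySem.List.pyRange_one_cons hk]
      rw [findInsLoopA, dif_pos hk]
      have hget : PySem.List.pyGet? r k = r[k.toNat]? := PySem.List.pyGet?_of_nonneg _ hk0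
      have hkn : k.toNat < r.length := by omega
      have hrk : PySem.List.pyGet? r k = some r[k.toNat] := by
        rw [hget]; exact List.getElem?_eq_getElem hkn
      by_cases hdash : r[k.toNat] = '-'
      · -- reference[k] == '-': seq[k] exists by Pre_
        have hs : k.toNat < s.length := hpre k.toNat hkn (by simp [List.getD, List.getElem?_eq_getElem hkn, hdash])
        have hsk : PySem.List.pyGet? s k = some s[k.toNat] := by
          rw [PySem.List.pyGet?_of_nonneg _ hk0]; exact List.getElem?_eq_getElem hs
        rw [if_pos (by rw [hrk, hdash]), hsk]
        set sc := s[k.toNat] with hsc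
        dsimp only
        by_cases hcond : sc ≠ '-' ∧ ¬ (sc = 'n' ∨ sc = 'N') ∧ PySem.List.pyGet? r k ≠ some sc
        · -- good position: extend the run
          rw [if_pos hcond]
          have hgood : findInsGood r s k = true := by
            obtain ⟨h1, h2, _⟩ := hcond
            have hn : sc ≠ 'n' := fun h => h2 (Or.inl h)
            have hN : sc ≠ 'N' := fun h => h2 (Or.inr h)
            simp [findInsGood, hrk, hdash, hsk, h1, hn, hN]
          rw [List.filter_cons_of_pos hgood, List.foldl_cons]
          have hstep : findInsStep (d, findInsCur k lun) k = (d, findInsCur (k + 1) (lun + 1)) := by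
            by_cases h0 : lun = 0
            · simp [findInsCur, h0, findInsStep]
            · simp only [findInsCur, if_neg h0, findInsStep, if_neg (by omega : ¬ (lun + 1 = 0))]
              have hb : k = (k - 1) + 1 := by omega
              rw [if_pos hb]
              congr 2 <;> ring
          rw [hstep]
          exact ih (k + 1) (lun + 1) d (by omega) (by omega) (by omega)
        · -- bad position (gap-vs-gap or n/N): close the run
          rw [if_neg hcond]
          have hgood : findInsGood r s k = false := by
            simp only [findInsGood, hrk, hdash, hsk]
            simp only [not_and_or, not_not] at hcond
            rcases hcond with h | h | h
            · simp [h]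
            · rcases h with h' | h' <;> simp [h']
            · rw [hrk, hdash] at h
              have hsc' : sc = '-' := (Option.some.inj h).symm
              simp [hsc']
          rw [List.filter_cons_of_neg (by simp [hgood]), ]
          by_cases h0 : lun = 0
          · rw [if_neg (by omega : ¬ lun > 0)]
            have := ih (k + 1) 0 d (by omega) (by omega) (by omega)
            rw [this]; simp [findInsCur, h0]
          · rw [if_pos (by omega : lun > 0)]
            have hIH := ih (k + 1) 0 (d.insert (k - lun + 1) lun) (by omega) (by omega) (by omega)
            rw [hIH]
            simp only [findInsCur, if_neg h0]
            rw [flush_foldl_break _ d (k - lun) (k - 1)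
                (by intro x hx
                    have hx' := PySem.List.mem_pyRange_one.mp (List.mem_of_mem_filter hx)
                    omega)]
            congr 3 <;> ring
      · -- reference[k] != '-'
        rw [if_neg (by rw [hrk]; intro h; exact hdash (Option.some.inj h))]
        have hgood : findInsGood r s k = false := by
          simp [findInsGood, hrk, hdash]
        rw [List.filter_cons_of_neg (by simp [hgood])]
        by_cases h0 : lun = 0
        · rw [if_neg (by omega : ¬ lun > 0)]
          have := ih (k + 1) 0 d (by omega) (by omega) (by omega)
          rw [this]; simp [findInsCur, h0]
        · rw [if_pos (by omega : lun > 0)]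
          have hIH := ih (k + 1) 0 (d.insert (k - lun + 1) lun) (by omega) (by omega) (by omega)
          rw [hIH]
          simp only [findInsCur, if_neg h0]
          rw [flush_foldl_break _ d (k - lun) (k - 1)
              (by intro x hx
                  have hx' := PySem.List.mem_pyRange_one.mp (List.mem_of_mem_filter hx)
                  omega)]
          congr 3 <;> ring

-- ===== VERDICT (by name: the statement is the Claim_ definition above) =====
theorem find_insertions_spec : Claim_equal_find_insertions := by
  intro reference seq _hdom hpre
  unfold Spec_find_insertions find_insertions find_insertions_alt
  rw [loopA_eq_foldB reference.toList seq.toList hpre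
      ((reference.toList.length : Int) - 0).toNat 0 0 PySem.Dict.empty le_rfl le_rfl rfl]
  simp [findInsCur]
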